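-- pv_equiv track=rewrite | github.com/luispozas/PR | Practica_2/SMT2/practica2.py | addsum
-- ===== SOURCE A (Python) =====
-- def addsum(a):
--     if len(a) == 0:
--         return "0"
--     elif len(a) == 1:
--         return a[0]
--     else :
--         x = a.pop()
--         return "(+ " + x + " " + addsum(a) + " )"
-- ===== SOURCE B (Python) =====
-- def addsum(a):
--     # Iterative accumulator instead of A's self-recursion; same return value.
--     # Note: A mutates `a` down to [a[0]] when len(a) >= 2; B leaves `a` untouched.
--     if len(a) == 0:
--         return "0"
--     inner = a[0]
--     for x in a[1:]:
--         inner = "(+ " + x + " " + inner + " )"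
--     return inner
-- ===== Notes on version B (the rewrite author's own statement) =====
-- stated objective: simpler
-- what changed: Replaces the self-recursion that pops the last element with a single left fold over the tail using an accumulator (no recursion, no list mutation; return value only - A empties a down to [a[0]] for len>=2, B does not mutate).
import Mathlib
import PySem

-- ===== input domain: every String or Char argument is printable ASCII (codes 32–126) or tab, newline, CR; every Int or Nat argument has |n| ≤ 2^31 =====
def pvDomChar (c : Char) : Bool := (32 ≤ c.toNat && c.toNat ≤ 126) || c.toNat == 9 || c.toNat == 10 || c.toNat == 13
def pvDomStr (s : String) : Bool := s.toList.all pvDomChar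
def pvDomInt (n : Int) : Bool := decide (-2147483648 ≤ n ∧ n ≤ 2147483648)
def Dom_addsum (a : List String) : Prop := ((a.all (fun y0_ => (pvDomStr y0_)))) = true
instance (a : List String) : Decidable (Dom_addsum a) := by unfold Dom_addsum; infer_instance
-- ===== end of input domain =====

-- B replaces A's pop-the-tail self-recursion by a single left fold with an accumulator
-- (return value only: A mutates `a` down to [a[0]] for len(a) >= 2, B does not mutate).


-- ===== PORT A =====
def addsum (a : List String) : String :=
  if a.length = 0 then "0"
  else if a.length = 1 then (PySem.List.pyGet? a 0).getD ""
  else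
    match h : PySem.List.pop? a (-1) with
    | some (x, rest) => "(+ " ++ x ++ " " ++ addsum rest ++ " )"
    | none => ""
termination_by a.length
decreasing_by
  have hlen : rest.length + 1 = a.length := PySem.List.length_of_pop?_eq_some a h
  omega

-- ===== PORT B =====
def addsum_alt (a : List String) : String :=
  match a with
  | [] => "0"
  | x :: rest => rest.foldl (fun inner y => "(+ " ++ y ++ " " ++ inner ++ " )") x

-- ===== PRECONDITION & SPEC =====
def Spec_addsum (a : List String) (out : String) : Prop := out = addsum_alt a
instance (a : List String) (out : String) : Decidable (Spec_addsum a out) := by unfold Spec_addsum; infer_instance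

-- ===== CLAIM (what is proved, stated in full; the proofs are below) =====
def Claim_equal_addsum : Prop := ∀ (a : List String), Dom_addsum a → Spec_addsum a (addsum a)

-- ===== LEMMAS AND PROOFS =====

theorem addsum_cons (x : String) (rest : List String) :
    addsum (x :: rest) = rest.foldl (fun inner y => "(+ " ++ y ++ " " ++ inner ++ " )") x := by
  induction rest using List.reverseRecOn generalizing x with
  | nil => rw [addsum.eq_def]; simp
  | append_singleton rs y ih =>
    rw [addsum]
    have hpop : PySem.List.pop? (x :: (rs ++ [y])) (-1) = some (y, x :: rs) := by
      have := PySem.List.pop?_last (xs := x :: rs) (x := y)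
      simpa using this
    have hlen : ¬ (x :: (rs ++ [y])).length = 0 := by simp
    have hlen1 : ¬ (x :: (rs ++ [y])).length = 1 := by simp
    simp only [hlen, hlen1, if_false]
    split
    · next x1 rest h =>
        rw [hpop] at h
        cases h
        simp [ih]
    · next h =>
        rw [hpop] at h
        cases h

-- ===== VERDICT (by name: the statement is the Claim_ definition above) =====
theorem addsum_spec : Claim_equal_addsum := by
  intro a _
  unfold Spec_addsum addsum_alt
  cases a with
  | nil => rw [addsum.eq_def]; simp
  | cons x rest => exact addsum_cons x rest
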